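-- pv_equiv track=rewrite | github.com/netletic/pybites | 287/sum_indices.py | sum_indices
-- ===== SOURCE A (Python) =====
-- from typing import List
--
-- def sum_indices(items: List[str]) -> int:
--     values = []
--     seen = {}
--     for i, string in enumerate(items):
--         if string not in seen:
--             value = i
--             seen[string] = i
--         else:
--             value = seen.get(string) + i
--             seen[string] = value
--         values.append(value)
--     return sum(values)
-- ===== SOURCE B (Python) =====
-- from typing import List
--
-- def sum_indices(items: List[str]) -> int:
--     # Phase 1: group the positions of each string.
--     groups = {}
--     for i, s in enumerate(items):
--         groups.setdefault(s, []).append(i)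
--     # Phase 2: each group's contribution is the sum of its prefix sums.
--     total = 0
--     for idxs in groups.values():
--         running = 0
--         for i in idxs:
--             running += i
--             total += running
--     return total
-- ===== Notes on version B (the rewrite author's own statement) =====
-- stated objective: alternative
-- what changed: Replaces A's single pass that keeps a per-string running value in a dict and appends every step's value to a list it sums at the end, with a two-phase group-by: first build a dict mapping each string to its list of positions, then reduce each group by a running prefix sum added into a grand total.
import Mathlib
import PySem

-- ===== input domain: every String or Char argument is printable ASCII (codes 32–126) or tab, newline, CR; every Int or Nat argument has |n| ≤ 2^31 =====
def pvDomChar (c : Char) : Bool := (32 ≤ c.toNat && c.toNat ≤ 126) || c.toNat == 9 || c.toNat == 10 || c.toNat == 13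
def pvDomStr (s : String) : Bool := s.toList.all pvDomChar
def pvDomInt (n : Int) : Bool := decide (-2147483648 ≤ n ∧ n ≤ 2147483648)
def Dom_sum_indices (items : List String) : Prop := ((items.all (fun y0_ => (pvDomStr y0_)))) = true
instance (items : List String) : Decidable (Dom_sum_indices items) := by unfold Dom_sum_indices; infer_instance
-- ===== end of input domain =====

-- B replaces A's single pass (running per-string value in a dict, values list summed at the
-- end) by a two-phase group-by: group positions per string, then reduce each group by a
-- running prefix sum into a grand total (alternative decomposition, same asymptotic cost).

-- ===== PORT A =====
-- step of A's loop over enumerate(items); state = (values, seen).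
-- `seen.get(string)` is ported as `getD … 0`: it is only evaluated in the branch where
-- `string` is contained, so the default is never used.
def sum_indices (items : List String) : Int :=
  let st := (PySem.List.enumerate items).foldl
    (fun (st : List Int × PySem.Dict String Int) p =>
      if st.2.contains p.2 = false then
        (st.1 ++ [p.1], st.2.insert p.2 p.1)
      else
        let value := st.2.getD p.2 0 + p.1
        (st.1 ++ [value], st.2.insert p.2 value))
    ([], PySem.Dict.empty)
  st.1.foldl (· + ·) 0

-- ===== PORT B =====
-- inner loop of B's second phase: running prefix sum added into the total.
def pssAdd (t : Int) (idxs : List Int) : Int :=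
  (idxs.foldl (fun rt i => (rt.1 + i, rt.2 + (rt.1 + i))) ((0 : Int), t)).2

def sum_indices_alt (items : List String) : Int :=
  let groups := (PySem.List.enumerate items).foldl
    (fun (d : PySem.Dict String (List Int)) p => d.modify p.2 [] (· ++ [p.1]))
    PySem.Dict.empty
  groups.values.foldl pssAdd 0

-- ===== PRECONDITION & SPEC =====
def Spec_sum_indices (items : List String) (out : Int) : Prop := out = sum_indices_alt items
instance (items : List String) (out : Int) : Decidable (Spec_sum_indices items out) := by unfold Spec_sum_indices; infer_instance

-- ===== CLAIM (what is proved, stated in full; the proofs are below) =====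
def Claim_equal_sum_indices : Prop := ∀ (items : List String), Dom_sum_indices items → Spec_sum_indices items (sum_indices items)

-- ===== LEMMAS AND PROOFS =====

-- the positions of string s in the pair list l
def pvIdx (l : List (Int × String)) (s : String) : List Int :=
  (l.filter (fun p => p.2 == s)).map (·.1)

-- sum of the prefix sums of xs
def pvPss (xs : List Int) : Int :=
  (xs.foldl (fun rt i => (rt.1 + i, rt.2 + (rt.1 + i))) ((0 : Int), (0 : Int))).2

-- the value both programs compute, as a sum over the distinct strings
def pvBval (l : List (Int × String)) : Int :=
  ((PySem.Set.ofList (l.map (·.2))).map (fun s => pvPss (pvIdx l s))).sum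

def pvAstep (st : List Int × PySem.Dict String Int) (p : Int × String) :
    List Int × PySem.Dict String Int :=
  if st.2.contains p.2 = false then
    (st.1 ++ [p.1], st.2.insert p.2 p.1)
  else
    let value := st.2.getD p.2 0 + p.1
    (st.1 ++ [value], st.2.insert p.2 value)

lemma pvFold_shift (xs : List Int) (a b : Int) :
    xs.foldl (fun rt i => (rt.1 + i, rt.2 + (rt.1 + i))) (a, b)
      = (a + xs.sum, b + (xs.foldl (fun rt i => (rt.1 + i, rt.2 + (rt.1 + i))) (a, 0)).2) := by
  induction xs generalizing a b with
  | nil => simp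
  | cons x xs ih =>
      simp only [List.foldl_cons, List.sum_cons]
      rw [ih (a + x) (b + (a + x)), ih (a + x) (0 + (a + x))]
      simp only [Prod.mk.injEq]
      refine ⟨by ring, by ring⟩

lemma pvPssAdd_eq (t : Int) (xs : List Int) : pssAdd t xs = t + pvPss xs := by
  unfold pssAdd pvPss
  rw [pvFold_shift xs 0 t, pvFold_shift xs 0 0]

lemma pvPss_append (xs : List Int) (i : Int) :
    pvPss (xs ++ [i]) = pvPss xs + xs.sum + i := by
  unfold pvPss
  rw [List.foldl_append, pvFold_shift xs 0 0]
  simp; ring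

lemma pvIdx_append (l : List (Int × String)) (i : Int) (s t : String) :
    pvIdx (l ++ [(i, s)]) t = pvIdx l t ++ (if t = s then [i] else []) := by
  unfold pvIdx
  rw [List.filter_append]
  by_cases h : t = s
  · subst h; simp [List.filter]
  · have h' : (s == t) = false := by
      simp only [beq_eq_false_iff_ne, ne_eq]
      exact fun e => h e.symm
    simp [List.filter, h, h']

lemma pvIdx_nil_of_not_mem (l : List (Int × String)) (s : String)
    (h : s ∉ l.map (·.2)) : pvIdx l s = [] := by
  unfold pvIdx
  rw [List.filter_eq_nil_iff.mpr, List.map_nil]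
  intro p hp
  simp only [beq_iff_eq]
  intro hps
  exact h (List.mem_map.mpr ⟨p, hp, by simpa using hps⟩)

lemma pvSum_map_congr_except {S : List String} (hS : S.Nodup) {s : String} (hs : s ∈ S)
    (f f' : String → Int) (δ : Int)
    (hne : ∀ t ∈ S, t ≠ s → f' t = f t) (hδ : f' s = f s + δ) :
    (S.map f').sum = (S.map f).sum + δ := by
  induction S with
  | nil => cases hs
  | cons a S ih =>
      rcases List.mem_cons.mp hs with h | h
      · subst h
        have : S.map f' = S.map f := by
          apply List.map_congr_left
          intro t ht
          exact hne t (List.mem_cons_of_mem _ ht) (fun e => (List.nodup_cons.mp hS).1 (e ▸ ht))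
        simp only [List.map_cons, List.sum_cons, this, hδ]
        ring
      · have ha : a ≠ s := fun e => (List.nodup_cons.mp hS).1 (e ▸ h)
        have := ih (List.nodup_cons.mp hS).2 h
          (fun t ht hts => hne t (List.mem_cons_of_mem _ ht) hts)
        simp only [List.map_cons, List.sum_cons, this, hne a (List.mem_cons_self) ha]
        ring

-- combined invariant of A's loop, proved by appending one pair at the end
lemma pvAfold_inv (l : List (Int × String)) :
    (∀ s, (l.foldl pvAstep ([], PySem.Dict.empty)).2.getD s 0 = (pvIdx l s).sum) ∧
    (∀ s, (l.foldl pvAstep ([], PySem.Dict.empty)).2.contains s = decide (s ∈ l.map (·.2))) ∧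
    ((l.foldl pvAstep ([], PySem.Dict.empty)).1.sum = pvBval l) := by
  induction l using List.reverseRecOn with
  | nil =>
      refine ⟨fun s => ?_, fun s => ?_, ?_⟩ <;> simp [pvIdx, pvBval, PySem.Set.ofList]
  | append_singleton l p ih =>
      obtain ⟨hget, hcont, hsum⟩ := ih
      obtain ⟨i, s⟩ := p
      rw [List.foldl_append, List.foldl_cons, List.foldl_nil]
      set st := l.foldl pvAstep ([], PySem.Dict.empty) with hst
      have hval : (pvAstep st (i, s)).2 = st.2.insert s ((pvIdx l s).sum + i) ∧
                  (pvAstep st (i, s)).1 = st.1 ++ [(pvIdx l s).sum + i] := by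
        unfold pvAstep
        by_cases hc : st.2.contains s = false
        · have hmem : s ∉ l.map (·.2) := by
            have := hcont s; rw [hc] at this
            simpa using this.symm
          rw [pvIdx_nil_of_not_mem l s hmem]
          simp [hc]
        · simp only [hc, hget s]
          simp
      refine ⟨fun t => ?_, fun t => ?_, ?_⟩
      · rw [hval.1, PySem.Dict.getD_insert, pvIdx_append]
        by_cases h : t = s
        · subst h; simp
        · simp [h, hget t]
      · rw [hval.1]
        rw [PySem.Dict.contains_insert, hcont t]
        by_cases h : t = s
        · subst h; simp
        · have hb : (t == s) = false := beq_eq_false_iff_ne.mpr h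
          simp [hb, h]
      · rw [hval.2, List.sum_append, List.sum_cons, List.sum_nil, hsum]
        unfold pvBval
        have hmapsnd : (l ++ [(i, s)]).map (·.2) = l.map (·.2) ++ [s] := by simp
        rw [hmapsnd, PySem.Set.ofList_append]
        set S := PySem.Set.ofList (l.map (·.2)) with hS
        have hSnd : S.Nodup := PySem.Set.nodup_ofList _
        have hupd : PySem.Set.update S [s] = PySem.Set.add S s := by
          rw [PySem.Set.update_cons, PySem.Set.update_nil]
        rw [hupd]
        by_cases hmem : s ∈ S
        · have hadd : PySem.Set.add S s = S := by
            simp [PySem.Set.add, PySem.Set.contains, hmem]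
          rw [hadd]
          rw [pvSum_map_congr_except hSnd hmem
            (fun t => pvPss (pvIdx l t)) (fun t => pvPss (pvIdx (l ++ [(i, s)]) t))
            ((pvIdx l s).sum + i) ?_ ?_]
          · ring
          · intro t _ hts
            simp [pvIdx_append, hts]
          · simp only [pvIdx_append, ite_true]
            rw [pvPss_append]
            ring
        · have hadd : PySem.Set.add S s = S ++ [s] := by
            simp [PySem.Set.add, PySem.Set.contains, hmem]
          rw [hadd, List.map_append, List.sum_append]
          have h1 : S.map (fun t => pvPss (pvIdx (l ++ [(i, s)]) t)) =
              S.map (fun t => pvPss (pvIdx l t)) := by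
            apply List.map_congr_left
            intro t ht
            rw [pvIdx_append]
            have : t ≠ s := fun e => hmem (e ▸ ht)
            simp [this]
          have h2 : pvIdx (l ++ [(i, s)]) s = [i] := by
            rw [pvIdx_append]
            have : s ∉ l.map (·.2) := by
              intro h; exact hmem (by rw [hS]; exact (PySem.Set.mem_ofList _ _).mpr h)
            rw [pvIdx_nil_of_not_mem l s this]
            simp
          have hnil : pvIdx l s = [] := by
            apply pvIdx_nil_of_not_mem
            intro h; exact hmem (by rw [hS]; exact (PySem.Set.mem_ofList _ _).mpr h)
          rw [h1]
          simp [h2, hnil, pvPss]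

-- B's result over an arbitrary pair list equals pvBval
lemma pvB_eq (l : List (Int × String)) :
    (l.foldl (fun (d : PySem.Dict String (List Int)) p => d.modify p.2 [] (· ++ [p.1]))
      PySem.Dict.empty).values.foldl pssAdd 0 = pvBval l := by
  set G := l.foldl (fun (d : PySem.Dict String (List Int)) p => d.modify p.2 [] (· ++ [p.1]))
      PySem.Dict.empty with hG
  have hGswap : G = (l.map (fun p => (p.2, p.1))).foldl
      (fun (d : PySem.Dict String (List Int)) p => d.modify p.1 [] (· ++ [p.2]))
      PySem.Dict.empty := by
    rw [List.foldl_map]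
  have hkeys : G.keys = PySem.Set.ofList (l.map (·.2)) := by
    rw [hG, PySem.Dict.keys_foldl_modify_key]
    simp only [PySem.Dict.keys_empty]
    rw [PySem.Set.update_nil_left]
  have hnd : G.keys.Nodup := by rw [hkeys]; exact PySem.Set.nodup_ofList _
  have hgetD : ∀ s, G.getD s [] = pvIdx l s := by
    intro s
    rw [hGswap, PySem.Dict.getD_foldl_modify_append]
    simp only [PySem.Dict.getD_empty, List.nil_append]
    rw [List.filter_map, List.map_map]
    rfl
  have hvals : G.values = G.keys.map (fun s => G.getD s []) := by
    exact PySem.Dict.values_eq_map_keys G hnd []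
  rw [hvals, hkeys]
  have hfold : ∀ (vs : List (List Int)) (a : Int),
      vs.foldl pssAdd a = a + (vs.map pvPss).sum := by
    intro vs
    induction vs with
    | nil => intro a; simp
    | cons v vs ih =>
        intro a
        rw [List.foldl_cons, pvPssAdd_eq, ih]
        simp; ring
  rw [hfold]
  unfold pvBval
  rw [List.map_map]
  have : ((fun s => G.getD s []) ·) = (fun s => G.getD s []) := rfl
  simp only [Function.comp_def, hgetD]
  rw [zero_add]

-- ===== VERDICT (by name: the statement is the Claim_ definition above) =====
theorem sum_indices_spec : Claim_equal_sum_indices := by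
  intro items _
  unfold Spec_sum_indices sum_indices sum_indices_alt
  simp only []
  have hA := pvAfold_inv (PySem.List.enumerate items)
  have hB := pvB_eq (PySem.List.enumerate items)
  have hstep : ((PySem.List.enumerate items).foldl
      (fun (st : List Int × PySem.Dict String Int) p =>
        if st.2.contains p.2 = false then
          (st.1 ++ [p.1], st.2.insert p.2 p.1)
        else
          (st.1 ++ [st.2.getD p.2 0 + p.1], st.2.insert p.2 (st.2.getD p.2 0 + p.1)))
      ([], PySem.Dict.empty)) =
      (PySem.List.enumerate items).foldl pvAstep ([], PySem.Dict.empty) := rfl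
  rw [hstep]
  rw [hB]
  rw [← hA.2.2]
  have := PySem.List.foldl_add (l := ((PySem.List.enumerate items).foldl pvAstep ([], PySem.Dict.empty)).1) (g := id) (a := 0)
  simpa using this
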